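-- pv_equiv track=rewrite | github.com/ctor-777/codewars-exercises | python/complete/useful/human_readable_duration.py | find_latest_and_penultimate_values
-- ===== SOURCE A (Python) =====
-- def find_latest_and_penultimate_values(quantities):
--     """ Returns the latest and penultimate values of a list bigger than 0
--
--         Parameters:
--             quantites (list/dict): the list where find the latest and penultimate
--
--         Returns:
--             tuple: containing latest and penultimate, in this order.
--         """
--
--     #Verifying that quantities is a list, turning it into a list if it is
--     # a list
--     if type(quantities) == dict:
--         quantities = [i for i in quantities.values()]
--
--     #Finding the latest value bigger to 0.
--     latest = None
--     penultimate = None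
--     for ind, value in enumerate(quantities):
--         if value > 0:
--             latest = ind
--
--     #Finding the penultimate values bigger than 0.
--     quantities_minus_last = quantities[:latest]
--     for ind,value in enumerate(quantities_minus_last):
--         if value > 0:
--             penultimate = ind
--
--     return (latest, penultimate)
-- ===== SOURCE B (Python) =====
-- def find_latest_and_penultimate_values(quantities):
--     """Single pass: shift (penultimate, latest) whenever a positive value appears."""
--     if type(quantities) == dict:
--         quantities = [i for i in quantities.values()]
--     latest = None
--     penultimate = None
--     for ind, value in enumerate(quantities):
--         if value > 0:
--             penultimate = latest
--             latest = ind
--     return (latest, penultimate)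
-- ===== Notes on version B (the rewrite author's own statement) =====
-- stated objective: simpler
-- what changed: Replaces A's two scans (one over the list, a second over the slice quantities[:latest]) with one pass that shifts a (penultimate, latest) pair at every positive value, eliminating the slice copy.
import Mathlib
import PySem

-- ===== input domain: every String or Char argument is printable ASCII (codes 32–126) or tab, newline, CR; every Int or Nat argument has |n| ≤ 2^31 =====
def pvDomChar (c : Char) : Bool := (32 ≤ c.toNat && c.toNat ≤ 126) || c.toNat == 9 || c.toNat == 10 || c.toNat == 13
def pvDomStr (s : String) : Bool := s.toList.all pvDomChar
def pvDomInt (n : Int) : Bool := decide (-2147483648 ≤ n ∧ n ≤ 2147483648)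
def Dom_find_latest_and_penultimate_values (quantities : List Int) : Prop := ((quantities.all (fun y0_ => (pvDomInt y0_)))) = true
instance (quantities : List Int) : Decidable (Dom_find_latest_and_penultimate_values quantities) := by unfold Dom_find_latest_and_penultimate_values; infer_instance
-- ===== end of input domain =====

-- B replaces A's two scans (second over the slice quantities[:latest]) with one pass keeping a (latest, penultimate) pair.


-- ===== PORT A =====
-- A's loop body: 'if value > 0: latest = ind' (used by both of A's loops, which are identical)
def pvScanA (acc : Option Int) (iv : Int × Int) : Option Int :=
  if iv.2 > 0 then some iv.1 else acc

def find_latest_and_penultimate_values (quantities : List Int) : Option Int × Option Int :=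
  -- latest = None; for ind, value in enumerate(quantities): if value > 0: latest = ind
  let latest := (PySem.List.enumerate quantities 0).foldl pvScanA none
  -- quantities_minus_last = quantities[:latest]   (latest may be None: whole list)
  let quantities_minus_last := PySem.List.slice quantities none latest
  -- penultimate loop over the slice
  let penultimate := (PySem.List.enumerate quantities_minus_last 0).foldl pvScanA none
  (latest, penultimate)

-- ===== PORT B =====
-- B's loop body: 'if value > 0: penultimate = latest; latest = ind'
def pvStepB (lp : Option Int × Option Int) (iv : Int × Int) : Option Int × Option Int :=
  if iv.2 > 0 then (some iv.1, lp.1) else lp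

def find_latest_and_penultimate_values_alt (quantities : List Int) : Option Int × Option Int :=
  (PySem.List.enumerate quantities 0).foldl pvStepB (none, none)

-- ===== PRECONDITION & SPEC =====
def Spec_find_latest_and_penultimate_values (quantities : List Int) (out : Option Int × Option Int) : Prop := out = find_latest_and_penultimate_values_alt quantities
instance (quantities : List Int) (out : Option Int × Option Int) : Decidable (Spec_find_latest_and_penultimate_values quantities out) := by unfold Spec_find_latest_and_penultimate_values; infer_instance

-- ===== CLAIM (what is proved, stated in full; the proofs are below) =====
def Claim_equal_find_latest_and_penultimate_values : Prop := ∀ (quantities : List Int), Dom_find_latest_and_penultimate_values quantities → Spec_find_latest_and_penultimate_values quantities (find_latest_and_penultimate_values quantities)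

-- ===== LEMMAS AND PROOFS =====

-- A's fold, appended with one element
theorem scanA_append (xs : List Int) (x : Int) :
    (PySem.List.enumerate (xs ++ [x]) 0).foldl pvScanA none =
      if x > 0 then some (xs.length : Int)
      else (PySem.List.enumerate xs 0).foldl pvScanA none := by
  rw [PySem.List.enumerate_append]
  simp [List.foldl_append, PySem.List.enumerate, pvScanA]

-- B's fold, appended with one element
theorem stepB_append (xs : List Int) (x : Int) :
    (PySem.List.enumerate (xs ++ [x]) 0).foldl pvStepB (none, none) =
      (if x > 0 then
        (some (xs.length : Int), ((PySem.List.enumerate xs 0).foldl pvStepB (none, none)).1)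
       else (PySem.List.enumerate xs 0).foldl pvStepB (none, none)) := by
  rw [PySem.List.enumerate_append]
  simp [List.foldl_append, PySem.List.enumerate, pvStepB]

-- the result of A's fold is an in-range index (or the initial accumulator)
theorem scanA_bound (xs : List Int) : ∀ (s : Int) (acc : Option Int) (l : Int),
    (PySem.List.enumerate xs s).foldl pvScanA acc = some l →
    acc = some l ∨ (s ≤ l ∧ l < s + xs.length) := by
  induction xs with
  | nil => intro s acc l h; exact Or.inl (by simpa [PySem.List.enumerate] using h)
  | cons y ys ih =>
    intro s acc l h
    rw [PySem.List.enumerate_cons] at h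
    simp only [List.foldl_cons] at h
    rcases ih (s + 1) (pvScanA acc (s, y)) l h with h1 | h1
    · by_cases hy : y > 0
      · simp [pvScanA, hy] at h1
        right; subst h1; simp only [List.length_cons]; push_cast; omega
      · simp [pvScanA, hy] at h1; exact Or.inl h1
    · right; simp only [List.length_cons]; push_cast; omega

-- main invariant, by induction from the back
theorem main_inv (xs : List Int) :
    (PySem.List.enumerate xs 0).foldl pvStepB (none, none) =
      ((PySem.List.enumerate xs 0).foldl pvScanA none,
       (PySem.List.enumerate (PySem.List.slice xs none ((PySem.List.enumerate xs 0).foldl pvScanA none)) 0).foldl pvScanA none) := by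
  induction xs using List.reverseRecOn with
  | nil => simp [PySem.List.enumerate, PySem.List.slice_none_none]
  | append_singleton ys y ih =>
    rw [stepB_append, scanA_append]
    by_cases hy : y > 0
    · simp only [hy, if_pos]
      rw [ih]
      have hs : PySem.List.slice (ys ++ [y]) none (some (ys.length : Int)) = ys := by
        rw [PySem.List.slice_to_natCast]
        simp
      rw [hs]
    · simp only [hy, ite_false]
      rw [ih]
      rcases hL : (PySem.List.enumerate ys 0).foldl pvScanA none with _ | l
      · -- latest is None: slice is the whole list; appended y <= 0 does not change the fold
        have h2 := scanA_append ys y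
        rw [if_neg hy, hL] at h2
        rw [PySem.List.slice_none_none, PySem.List.slice_none_none, h2, hL]
      · -- latest = some l with 0 <= l < ys.length: the slice ignores the appended element
        rcases scanA_bound ys 0 none l hL with h1 | h1
        · simp at h1
        · have hl0 : 0 ≤ l := h1.1
          have hlen : l.toNat ≤ ys.length := by omega
          rw [PySem.List.slice_to _ hl0, PySem.List.slice_to _ hl0,
              List.take_append_of_le_length hlen]

-- ===== VERDICT (by name: the statement is the Claim_ definition above) =====
theorem find_latest_and_penultimate_values_spec : Claim_equal_find_latest_and_penultimate_values := by
  intro qs _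
  unfold Spec_find_latest_and_penultimate_values find_latest_and_penultimate_values find_latest_and_penultimate_values_alt
  rw [main_inv]
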